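-- pv_equiv track=rewrite | github.com/namemechan/comfyui_text_Prefix_exchanger | at_exchanger__advanced_.py | _process
-- ===== SOURCE A (Python) =====
-- def _process(text, prefix, replacement, exceptions):
--     """문자 단위 순회로 접두사 감지 및 치환, 예외 항목은 원문 보존"""
--     result = []
--     i = 0
--     prefix_len = len(prefix)
--
--     while i < len(text):
--         if text[i:i + prefix_len] == prefix:
--             matched_exception = None
--             for exc in exceptions:
--                 if text[i:i + len(exc)] == exc:
--                     matched_exception = exc
--                     break
--
--             if matched_exception is not None:
--                 result.append(matched_exception)
--                 i += len(matched_exception)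
--             else:
--                 result.append(replacement)
--                 i += prefix_len
--         else:
--             result.append(text[i])
--             i += 1
--
--     return "".join(result)
-- ===== SOURCE B (Python) =====
-- def _process(text, prefix, replacement, exceptions):
--     # Jump between prefix occurrences with str.find instead of walking one
--     # character at a time; copy the untouched stretches in one slice each.
--     out = []
--     i = 0
--     n = len(text)
--     while i < n:
--         j = text.find(prefix, i)
--         if j == -1:
--             out.append(text[i:])
--             break
--         out.append(text[i:j])
--         for e in exceptions:
--             if text.startswith(e, j):
--                 out.append(e)
--                 i = j + len(e)
--                 break
--         else:
--             out.append(replacement)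
--             i = j + len(prefix)
--     return "".join(out)
-- ===== Notes on version B (the rewrite author's own statement) =====
-- stated objective: faster
-- what changed: Instead of A's per-character walk that slice-compares the prefix at every index, B jumps straight between prefix occurrences with str.find, copies each untouched stretch in a single slice, and tests exceptions with startswith instead of building slices.
-- outside the precondition, e.g. on _process('aax', 'a', 'r', ['aa', '']): A returns 'aax', B returns 'aax'
import Mathlib
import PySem

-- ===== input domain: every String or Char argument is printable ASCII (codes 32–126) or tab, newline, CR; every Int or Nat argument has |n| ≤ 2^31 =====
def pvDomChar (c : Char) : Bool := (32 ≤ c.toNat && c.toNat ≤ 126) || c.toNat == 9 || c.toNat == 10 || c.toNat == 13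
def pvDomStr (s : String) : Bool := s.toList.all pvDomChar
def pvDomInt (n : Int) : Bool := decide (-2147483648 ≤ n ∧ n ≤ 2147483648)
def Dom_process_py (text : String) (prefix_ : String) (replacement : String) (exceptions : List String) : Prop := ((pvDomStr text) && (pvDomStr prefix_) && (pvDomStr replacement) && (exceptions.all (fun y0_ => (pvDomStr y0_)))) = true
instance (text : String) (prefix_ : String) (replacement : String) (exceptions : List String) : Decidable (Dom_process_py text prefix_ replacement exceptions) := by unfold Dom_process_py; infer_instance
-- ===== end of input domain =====

-- B replaces A's one-character-at-a-time scan by jumping directly between prefix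
-- occurrences (str.find) and copying untouched stretches in one slice each;
-- same return value, measured constant-factor speed-up.

-- ===== PORT A =====
-- first exception exc (in list order) with text[i:i+len(exc)] == exc, where s = text[i:]
def pvFindExcA (s : List Char) : List (List Char) → Option (List Char)
  | [] => none
  | e :: rest => if s.take e.length = e then some e else pvFindExcA s rest

-- the while-loop of A; `fuel` only makes the recursion total (A diverges exactly
-- where the fuel would run out, and those inputs are outside Pre_).
-- text[i:i+m] for 0 ≤ i is exactly (tl.drop i).take m; text[i] for i < len is (tl.drop i).take 1.
def pvGoA (tl pre rep : List Char) (excs : List (List Char)) : Nat → Nat → List Char → List Char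
  | 0, _, acc => acc
  | fuel+1, i, acc =>
    if i < tl.length then
      if (tl.drop i).take pre.length = pre then
        match pvFindExcA (tl.drop i) excs with
        | some e => pvGoA tl pre rep excs fuel (i + e.length) (acc ++ e)
        | none   => pvGoA tl pre rep excs fuel (i + pre.length) (acc ++ rep)
      else
        pvGoA tl pre rep excs fuel (i + 1) (acc ++ (tl.drop i).take 1)
    else acc

def process_py (text : String) (prefix_ : String) (replacement : String) (exceptions : List String) : String :=
  String.ofList (pvGoA text.toList prefix_.toList replacement.toList (exceptions.map String.toList)
    (text.toList.length + 1) 0 [])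

-- ===== PORT B =====
-- text.find(prefix, i) for 0 ≤ i: lowest j ≥ i with j + len(prefix) ≤ len and a match; fuel covers i..len
def pvFind (tl pre : List Char) : Nat → Nat → Option Nat
  | 0, _ => none
  | fuel+1, i =>
    if i + pre.length ≤ tl.length then
      if (tl.drop i).take pre.length = pre then some i
      else pvFind tl pre fuel (i + 1)
    else none

-- the for/else of B: first exc with text.startswith(exc, j)
def pvFirstExcB (tl : List Char) (j : Nat) : List (List Char) → Option (List Char)
  | [] => none
  | e :: rest => if e.isPrefixOf (tl.drop j) then some e else pvFirstExcB tl j rest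

-- the while-loop of B (fuel for totality only)
def pvGoB (tl pre rep : List Char) (excs : List (List Char)) : Nat → Nat → List Char → List Char
  | 0, _, acc => acc
  | fuel+1, i, acc =>
    if i < tl.length then
      match pvFind tl pre (tl.length + 1) i with
      | none => acc ++ tl.drop i          -- out.append(text[i:]); break
      | some j =>
        match pvFirstExcB tl j excs with  -- acc2 = acc ++ text[i:j]
        | some e => pvGoB tl pre rep excs fuel (j + e.length) ((acc ++ (tl.drop i).take (j - i)) ++ e)
        | none   => pvGoB tl pre rep excs fuel (j + pre.length) ((acc ++ (tl.drop i).take (j - i)) ++ rep)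
    else acc

def process_py_alt (text : String) (prefix_ : String) (replacement : String) (exceptions : List String) : String :=
  String.ofList (pvGoB text.toList prefix_.toList replacement.toList (exceptions.map String.toList)
    (text.toList.length + 1) 0 [])

-- ===== PRECONDITION & SPEC =====
-- Pre_ excludes the inputs on which A's loop can stall and diverge: a position
-- where the prefix matches but the first matching exception is empty, or no
-- exception matches and the prefix itself is empty (i would stop advancing).
-- Pre_ quantifies over ALL such text positions, so it also excludes a few inputs
-- where the stalling position is never reached and A still returns; see claim cites.
def Pre_process_py (text : String) (prefix_ : String) (replacement : String) (exceptions : List String) : Prop :=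
  ∀ k < text.toList.length,
    (text.toList.drop k).take prefix_.toList.length = prefix_.toList →
    (((exceptions.map String.toList).find?
        (fun e => e.isPrefixOf (text.toList.drop k))).getD prefix_.toList) ≠ []
instance (text : String) (prefix_ : String) (replacement : String) (exceptions : List String) : Decidable (Pre_process_py text prefix_ replacement exceptions) := by unfold Pre_process_py; infer_instance

def pvWitness_process_py : String × String × String × List String :=
  ("hello at-cat and at-dog", "at-", "pre-", ["at-dog", "at-b"])

def Spec_process_py (text : String) (prefix_ : String) (replacement : String) (exceptions : List String) (out : String) : Prop := out = process_py_alt text prefix_ replacement exceptions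
instance (text : String) (prefix_ : String) (replacement : String) (exceptions : List String) (out : String) : Decidable (Spec_process_py text prefix_ replacement exceptions out) := by unfold Spec_process_py; infer_instance

-- ===== CLAIM (what is proved, stated in full; the proofs are below) =====
def Claim_equal_process_py : Prop := ∀ (text : String) (prefix_ : String) (replacement : String) (exceptions : List String), Dom_process_py text prefix_ replacement exceptions → Pre_process_py text prefix_ replacement exceptions → Spec_process_py text prefix_ replacement exceptions (process_py text prefix_ replacement exceptions)

-- ===== LEMMAS AND PROOFS =====

-- "prefix matches at position k" — the test both loops perform
def pvMatchAt (tl pre : List Char) (k : Nat) : Prop := (tl.drop k).take pre.length = pre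

theorem pvMatchAt_le {tl pre : List Char} {k : Nat} (hk : k < tl.length)
    (h : pvMatchAt tl pre k) : k + pre.length ≤ tl.length := by
  have hl : ((tl.drop k).take pre.length).length = pre.length := by rw [h]
  simp [List.length_take, List.length_drop] at hl
  omega

theorem pvFind_some {tl pre : List Char} {fu i j : Nat}
    (h : pvFind tl pre fu i = some j) :
    i ≤ j ∧ pvMatchAt tl pre j ∧ ∀ k, i ≤ k → k < j → ¬ pvMatchAt tl pre k := by
  induction fu generalizing i with
  | zero => simp [pvFind] at h
  | succ fu ih =>
    unfold pvFind at h
    by_cases hb : i + pre.length ≤ tl.length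
    · simp only [if_pos hb] at h
      by_cases hm : (tl.drop i).take pre.length = pre
      · simp only [if_pos hm] at h
        obtain rfl : i = j := Option.some.inj h
        exact ⟨le_refl _, hm, fun k hk1 hk2 _ => absurd hk1 (by omega)⟩
      · simp only [if_neg hm] at h
        obtain ⟨h1, h2, h3⟩ := ih h
        refine ⟨by omega, h2, fun k hk1 hk2 hmk => ?_⟩
        rcases Nat.eq_or_lt_of_le hk1 with rfl | hlt
        · exact hm hmk
        · exact h3 k hlt hk2 hmk
    · simp [if_neg hb] at h

theorem pvFind_le {tl pre : List Char} {fu i j : Nat}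
    (h : pvFind tl pre fu i = some j) : j + pre.length ≤ tl.length := by
  induction fu generalizing i with
  | zero => simp [pvFind] at h
  | succ fu ih =>
    unfold pvFind at h
    by_cases hb : i + pre.length ≤ tl.length
    · simp only [if_pos hb] at h
      by_cases hm : (tl.drop i).take pre.length = pre
      · rw [if_pos hm] at h
        obtain rfl : i = j := Option.some.inj h
        exact hb
      · simp only [if_neg hm] at h; exact ih h
    · simp [if_neg hb] at h

theorem pvFind_none {tl pre : List Char} {fu i : Nat}
    (hfu : tl.length + 1 ≤ fu + i)
    (h : pvFind tl pre fu i = none) :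
    ∀ k, i ≤ k → k < tl.length → ¬ pvMatchAt tl pre k := by
  induction fu generalizing i with
  | zero => intro k hk hkn _; omega
  | succ fu ih =>
    unfold pvFind at h
    by_cases hb : i + pre.length ≤ tl.length
    · simp only [if_pos hb] at h
      by_cases hm : (tl.drop i).take pre.length = pre
      · simp [if_pos hm] at h
      · simp only [if_neg hm] at h
        intro k hk hkn hmk
        rcases Nat.eq_or_lt_of_le hk with rfl | hlt
        · exact hm hmk
        · exact ih (by omega) h k hlt hkn hmk
    · intro k hk hkn hm
      have := pvMatchAt_le hkn hm
      omega

theorem pvExc_eq (tl : List Char) (j : Nat) (excs : List (List Char)) :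
    pvFindExcA (tl.drop j) excs = pvFirstExcB tl j excs := by
  induction excs with
  | nil => rfl
  | cons e rest ih =>
    unfold pvFindExcA pvFirstExcB
    have heq : ((tl.drop j).take e.length = e) ↔ (e.isPrefixOf (tl.drop j) = true) := by
      rw [List.isPrefixOf_iff_prefix, List.prefix_iff_eq_take]
      constructor <;> (intro h; exact h.symm)
    by_cases hc : (tl.drop j).take e.length = e
    · rw [if_pos hc, if_pos (heq.mp hc)]
    · rw [if_neg hc, if_neg (fun hb => hc (heq.mpr hb)), ih]

theorem pvFirstExcB_find? (tl : List Char) (j : Nat) (excs : List (List Char)) :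
    pvFirstExcB tl j excs = excs.find? (fun e => e.isPrefixOf (tl.drop j)) := by
  induction excs with
  | nil => rfl
  | cons e rest ih =>
    unfold pvFirstExcB
    by_cases hc : e.isPrefixOf (tl.drop j) = true
    · simp [hc]
    · simp only [Bool.not_eq_true] at hc
      simp [hc, ih]

theorem pvGoA_succ (tl pre rep : List Char) (excs : List (List Char)) (f i : Nat)
    (acc : List Char) :
    pvGoA tl pre rep excs (f + 1) i acc =
      (if i < tl.length then
        if (tl.drop i).take pre.length = pre then
          match pvFindExcA (tl.drop i) excs with
          | some e => pvGoA tl pre rep excs f (i + e.length) (acc ++ e)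
          | none   => pvGoA tl pre rep excs f (i + pre.length) (acc ++ rep)
        else pvGoA tl pre rep excs f (i + 1) (acc ++ (tl.drop i).take 1)
      else acc) := rfl

theorem pvGoB_succ (tl pre rep : List Char) (excs : List (List Char)) (g i : Nat)
    (acc : List Char) :
    pvGoB tl pre rep excs (g + 1) i acc =
      (if i < tl.length then
        match pvFind tl pre (tl.length + 1) i with
        | none => acc ++ tl.drop i
        | some j =>
          match pvFirstExcB tl j excs with
          | some e => pvGoB tl pre rep excs g (j + e.length) ((acc ++ (tl.drop i).take (j - i)) ++ e)
          | none   => pvGoB tl pre rep excs g (j + pre.length) ((acc ++ (tl.drop i).take (j - i)) ++ rep)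
      else acc) := rfl

theorem pvGoA_exit (tl pre rep : List Char) (excs : List (List Char)) (f i : Nat)
    (acc : List Char) (h : tl.length ≤ i) : pvGoA tl pre rep excs f i acc = acc := by
  cases f with
  | zero => rfl
  | succ f => rw [pvGoA_succ, if_neg (by omega)]

-- A walks one character at a time across a stretch with no prefix match
theorem pvGoA_walk (tl pre rep : List Char) (excs : List (List Char)) :
    ∀ (d f i : Nat) (acc : List Char), d ≤ f → i + d ≤ tl.length →
    (∀ k, i ≤ k → k < i + d → ¬ pvMatchAt tl pre k) →
    pvGoA tl pre rep excs f i acc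
      = pvGoA tl pre rep excs (f - d) (i + d) (acc ++ (tl.drop i).take d) := by
  intro d
  induction d with
  | zero => intro f i acc _ _ _; simp
  | succ d ih =>
    intro f i acc hdf hlen hnm
    obtain ⟨f', rfl⟩ : ∃ f', f = f' + 1 := ⟨f - 1, by omega⟩
    have hni : ¬ (List.take pre.length (List.drop i tl) = pre) :=
      hnm i (le_refl _) (by omega)
    rw [pvGoA_succ, if_pos (by omega : i < tl.length), if_neg hni]
    rw [ih f' (i + 1) (acc ++ (tl.drop i).take 1) (by omega) (by omega)
        (fun k hk1 hk2 => hnm k (by omega) (by omega))]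
    have hstep : (acc ++ (tl.drop i).take 1) ++ (tl.drop (i + 1)).take d
        = acc ++ (tl.drop i).take (d + 1) := by
      rw [List.append_assoc]
      congr 1
      have : tl.drop (i + 1) = (tl.drop i).drop 1 := by rw [List.drop_drop]
      rw [this, ← List.take_add, Nat.add_comm 1 d]
    rw [hstep]
    have h1 : i + 1 + d = i + (d + 1) := by omega
    have h2 : f' - d = f' + 1 - (d + 1) := by omega
    rw [h1, h2]

-- A with no prefix match anywhere from i copies the rest of the text
theorem pvGoA_end (tl pre rep : List Char) (excs : List (List Char)) :
    ∀ (f i : Nat) (acc : List Char), tl.length ≤ f + i →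
    (∀ k, i ≤ k → k < tl.length → ¬ pvMatchAt tl pre k) →
    pvGoA tl pre rep excs f i acc = acc ++ tl.drop i := by
  intro f
  induction f with
  | zero =>
    intro i acc hf _
    rw [pvGoA_exit _ _ _ _ _ _ _ (by omega), List.drop_eq_nil_of_le (by omega),
        List.append_nil]
  | succ f ih =>
    intro i acc hf hnm
    by_cases hi : i < tl.length
    · have hni : ¬ (List.take pre.length (List.drop i tl) = pre) := hnm i (le_refl _) hi
      rw [pvGoA_succ, if_pos hi, if_neg hni]
      rw [ih (i + 1) _ (by omega) (fun k hk hkn => hnm k (by omega) hkn)]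
      rw [List.append_assoc]
      congr 1
      have h1 : tl.drop (i + 1) = (tl.drop i).drop 1 := by rw [List.drop_drop]
      rw [h1, List.take_append_drop]
    · rw [pvGoA_exit _ _ _ _ _ _ _ (by omega), List.drop_eq_nil_of_le (by omega),
          List.append_nil]

theorem pvGo_eq (tl pre rep : List Char) (excs : List (List Char))
    (H : ∀ k, k < tl.length → pvMatchAt tl pre k →
      ((excs.find? (fun e => e.isPrefixOf (tl.drop k))).getD pre) ≠ []) :
    ∀ (g f i : Nat) (acc : List Char), tl.length ≤ f + i → tl.length ≤ g + i →
    pvGoA tl pre rep excs f i acc = pvGoB tl pre rep excs g i acc := by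
  intro g
  induction g with
  | zero =>
    intro f i acc hf hg
    rw [pvGoA_exit _ _ _ _ _ _ _ (by omega)]
    rfl
  | succ g ih =>
    intro f i acc hf hg
    by_cases hi : i < tl.length
    · rw [pvGoB_succ, if_pos hi]
      cases hfind : pvFind tl pre (tl.length + 1) i with
      | none =>
        dsimp only
        exact pvGoA_end tl pre rep excs f i acc hf
          (pvFind_none (by omega) hfind)
      | some j =>
        obtain ⟨hij, hmj, hnm⟩ := pvFind_some hfind
        have hjlen : j + pre.length ≤ tl.length := pvFind_le hfind
        have hj : j < tl.length := by
          by_cases hp0 : pre.length = 0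
          · -- empty prefix: it matches at i itself, so minimality forces j = i < n
            rcases Nat.eq_or_lt_of_le hij with rfl | hlt
            · exact hi
            · exact absurd (show pvMatchAt tl pre i by
                have hpe : pre = [] := List.length_eq_zero_iff.mp hp0
                simp [pvMatchAt, hpe]) (hnm i (le_refl _) hlt)
          · omega
        have hH := H j hj hmj
        rw [pvGoA_walk tl pre rep excs (j - i) f i acc (by omega) (by omega)
            (fun k hk1 hk2 => hnm k hk1 (by omega))]
        have hji : i + (j - i) = j := by omega
        rw [hji]
        obtain ⟨f', hf'⟩ : ∃ f', f - (j - i) = f' + 1 := ⟨f - (j - i) - 1, by omega⟩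
        rw [hf']
        have hmj' : List.take pre.length (List.drop j tl) = pre := hmj
        rw [pvGoA_succ, if_pos hj, if_pos hmj', pvExc_eq]
        dsimp only
        cases hexcf : pvFirstExcB tl j excs with
        | some e =>
          rw [← pvFirstExcB_find?, hexcf] at hH
          have hel : 0 < e.length := List.length_pos_iff.mpr (by simpa using hH)
          dsimp only
          exact ih f' (j + e.length) _ (by omega) (by omega)
        | none =>
          rw [← pvFirstExcB_find?, hexcf] at hH
          have hpl : 0 < pre.length := List.length_pos_iff.mpr (by simpa using hH)
          dsimp only
          exact ih f' (j + pre.length) _ (by omega) (by omega)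
    · rw [pvGoA_exit _ _ _ _ _ _ _ (by omega), pvGoB_succ, if_neg hi]

-- ===== VERDICT (by name: the statement is the Claim_ definition above) =====
theorem process_py_spec : Claim_equal_process_py := by
  intro text prefix_ replacement exceptions _ hpre
  unfold Spec_process_py process_py process_py_alt
  congr 1
  exact pvGo_eq _ _ _ _ (fun k hk hm => hpre k hk hm) _ _ 0 [] (by omega) (by omega)
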